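-- pv_equiv track=rewrite | github.com/pviafore/RobustPython | code_examples/chapter17/recommendation.py | recommend_meal
-- ===== SOURCE A (Python) =====
-- Meal = str
--
-- Ingredient = str
--
-- def get_proximity(meal, _ ):
--     return len(meal)
--
-- def recommend_meal(last_meal: Meal,
--                    specials: list[Meal],
--                    surplus: list[Ingredient]) -> list[Meal]:
--     highest_proximity = 0
--     for special in specials:
--         if (proximity := get_proximity(special, surplus)) > highest_proximity:
--             highest_proximity = proximity
--
--     grouped_by_surplus_matching = []
--     for special in specials:
--         if get_proximity(special, surplus) == highest_proximity:
--             grouped_by_surplus_matching.append(special)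
--
--     filtered_meals = []
--     for meal in grouped_by_surplus_matching:
--         if get_proximity(meal, last_meal) > .75:
--             filtered_meals.append(meal)
--
--     sorted_meals = sorted(filtered_meals,
--                           key=lambda meal: get_proximity(meal, last_meal),
--                           reverse=True)
--
--     return sorted_meals[:3]
-- ===== SOURCE B (Python) =====
-- def get_proximity(meal, _):
--     return len(meal)
--
-- def recommend_meal(last_meal, specials, surplus):
--     # single pass: track the best proximity and the first (up to) 3 meals achieving it
--     best = 0
--     top = []
--     for special in specials:
--         n = get_proximity(special, surplus)
--         if n > best:
--             best = n
--             top = [special]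
--         elif n == best and len(top) < 3:
--             top.append(special)
--     return top if best > 0 else []
-- ===== Notes on version B (the rewrite author's own statement) =====
-- stated objective: alternative
-- what changed: B replaces A's four passes (max scan, group-by-max scan, threshold filter, sort + slice) with a single pass that tracks the best proximity and the first up-to-3 meals achieving it, exploiting that the sort key is constant on the grouped list so the stable sort is the identity.
import Mathlib
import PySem

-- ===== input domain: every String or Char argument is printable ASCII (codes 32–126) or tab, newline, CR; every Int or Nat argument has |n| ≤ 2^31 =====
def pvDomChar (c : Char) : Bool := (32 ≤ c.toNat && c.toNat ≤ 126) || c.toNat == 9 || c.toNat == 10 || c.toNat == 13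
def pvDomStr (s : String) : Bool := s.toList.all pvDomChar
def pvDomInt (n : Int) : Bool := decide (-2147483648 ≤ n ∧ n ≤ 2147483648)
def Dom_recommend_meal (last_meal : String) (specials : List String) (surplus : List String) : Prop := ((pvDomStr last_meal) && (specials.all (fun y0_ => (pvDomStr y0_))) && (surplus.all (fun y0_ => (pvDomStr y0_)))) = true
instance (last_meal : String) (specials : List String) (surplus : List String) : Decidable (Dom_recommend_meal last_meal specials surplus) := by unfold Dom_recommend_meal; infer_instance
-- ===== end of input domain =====

-- B replaces A's four passes (max scan, group scan, filter, stable sort + slice) with one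
-- pass tracking the best proximity and the first up-to-3 meals achieving it; equal results.

-- ===== PORT A =====
-- get_proximity(meal, _) = len(meal)
def pvGetProximity (meal : String) (_ignored : List String) : Int := PySem.Str.len meal
def pvGetProximityS (meal : String) (_ignored : String) : Int := PySem.Str.len meal

def recommend_meal (last_meal : String) (specials : List String) (surplus : List String) : List String :=
  let highest_proximity : Int :=
    specials.foldl (fun h special =>
      if pvGetProximity special surplus > h then pvGetProximity special surplus else h) 0
  let grouped_by_surplus_matching : List String :=
    specials.foldl (fun acc special =>
      if pvGetProximity special surplus == highest_proximity then acc ++ [special] else acc) []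
  let filtered_meals : List String :=
    grouped_by_surplus_matching.foldl (fun acc meal =>
      -- 'get_proximity(meal, last_meal) > .75' : the proximity is an int, so this is exactly 1 ≤ len
      if 1 ≤ pvGetProximityS meal last_meal then acc ++ [meal] else acc) []
  let sorted_meals :=
    PySem.List.sorted filtered_meals (fun meal => pvGetProximityS meal last_meal) true
  PySem.List.slice sorted_meals none (some 3)

-- ===== PORT B =====
def pvBLoop : List String → Int → List String → Int × List String
  | [], best, top => (best, top)
  | special :: rest, best, top =>
    let n := PySem.Str.len special
    if n > best then pvBLoop rest n [special]
    else if n == best && decide (top.length < 3) then pvBLoop rest best (top ++ [special])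
    else pvBLoop rest best top

def recommend_meal_alt (last_meal : String) (specials : List String) (surplus : List String) : List String :=
  let r := pvBLoop specials 0 []
  if r.1 > 0 then r.2 else []

-- ===== PRECONDITION & SPEC =====
def Spec_recommend_meal (last_meal : String) (specials : List String) (surplus : List String) (out : List String) : Prop := out = recommend_meal_alt last_meal specials surplus
instance (last_meal : String) (specials : List String) (surplus : List String) (out : List String) : Decidable (Spec_recommend_meal last_meal specials surplus out) := by unfold Spec_recommend_meal; infer_instance

-- ===== CLAIM (what is proved, stated in full; the proofs are below) =====
def Claim_equal_recommend_meal : Prop := ∀ (last_meal : String) (specials : List String) (surplus : List String), Dom_recommend_meal last_meal specials surplus → Spec_recommend_meal last_meal specials surplus (recommend_meal last_meal specials surplus)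

-- ===== LEMMAS AND PROOFS =====

def pvMax : List String → Int
  | [] => 0
  | s :: l => max (PySem.Str.len s) (pvMax l)

lemma pvLen_nonneg (s : String) : 0 ≤ PySem.Str.len s := by
  rw [PySem.Str.len_eq]; exact Int.natCast_nonneg _

lemma pvMax_nonneg (l : List String) : 0 ≤ pvMax l := by
  induction l with
  | nil => simp [pvMax]
  | cons s l ih => simp only [pvMax, le_max_iff]; exact Or.inr ih

lemma pvFoldl_max (l : List String) (h : Int) (hh : 0 ≤ h) :
    l.foldl (fun h s => if PySem.Str.len s > h then PySem.Str.len s else h) h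
      = max h (pvMax l) := by
  induction l generalizing h with
  | nil => simp only [List.foldl_nil, pvMax]; omega
  | cons s l ih =>
    simp only [List.foldl_cons, pvMax]
    have hs := pvLen_nonneg s
    rw [show (if PySem.Str.len s > h then PySem.Str.len s else h) = max h (PySem.Str.len s) by
      split <;> omega]
    rw [ih _ (by omega), max_assoc]

lemma pvBLoop_spec (l : List String) (b : Int) (t : List String)
    (hb : 0 ≤ b) (ht : t.length ≤ 3) :
    pvBLoop l b t = (max b (pvMax l),
      if pvMax l ≤ b then (t ++ l.filter (fun s => PySem.Str.len s == b)).take 3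
      else (l.filter (fun s => PySem.Str.len s == pvMax l)).take 3) := by
  induction l generalizing b t with
  | nil =>
    simp only [pvBLoop, pvMax, List.filter_nil, List.append_nil]
    rw [max_eq_left hb, if_pos hb, List.take_of_length_le ht]
  | cons s l ih =>
    have hs := pvLen_nonneg s
    simp only [pvBLoop, pvMax]
    by_cases h1 : PySem.Str.len s > b
    · rw [if_pos h1, ih _ _ hs (by simp)]
      by_cases h2 : pvMax l ≤ PySem.Str.len s
      · rw [if_pos h2, max_eq_left h2, if_neg (by omega : ¬ PySem.Str.len s ≤ b),
          max_eq_right (le_of_lt h1),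
          List.filter_cons_of_pos (p := fun x => PySem.Str.len x == PySem.Str.len s)
            (beq_self_eq_true _), List.singleton_append]
      · rw [if_neg h2, max_eq_right (by omega : PySem.Str.len s ≤ pvMax l),
          if_neg (by omega : ¬ pvMax l ≤ b), max_eq_right (by omega : b ≤ pvMax l),
          List.filter_cons_of_neg (p := fun x => PySem.Str.len x == pvMax l)
            (fun hx => absurd (eq_of_beq hx) (by omega))]
    · rw [if_neg h1]
      have hsb : PySem.Str.len s ≤ b := by omega
      have hfst : max b (max (PySem.Str.len s) (pvMax l)) = max b (pvMax l) := by omega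
      by_cases h2 : ((PySem.Str.len s == b) && decide (t.length < 3)) = true
      · have hq : PySem.Str.len s = b := eq_of_beq ((Bool.and_eq_true _ _).mp h2).1
        have htl : t.length < 3 := of_decide_eq_true ((Bool.and_eq_true _ _).mp h2).2
        rw [if_pos h2,
          ih _ _ hb (by simp only [List.length_append, List.length_cons, List.length_nil]; omega),
          hfst]
        by_cases h3 : pvMax l ≤ b
        · rw [if_pos (by omega : max (PySem.Str.len s) (pvMax l) ≤ b), if_pos h3,
            List.filter_cons_of_pos (p := fun x => PySem.Str.len x == b) (beq_iff_eq.mpr hq),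
            List.append_assoc, List.singleton_append]
        · rw [if_neg (by omega : ¬ max (PySem.Str.len s) (pvMax l) ≤ b), if_neg h3,
            max_eq_right (by omega : PySem.Str.len s ≤ pvMax l),
            List.filter_cons_of_neg (p := fun x => PySem.Str.len x == pvMax l)
              (fun hx => absurd (eq_of_beq hx) (by omega))]
      · rw [if_neg h2, ih _ _ hb ht, hfst]
        by_cases h3 : pvMax l ≤ b
        · rw [if_pos (by omega : max (PySem.Str.len s) (pvMax l) ≤ b), if_pos h3]
          by_cases h4 : (PySem.Str.len s == b) = true
          · -- here t is already full: take 3 ignores everything after t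
            have ht3 : 3 ≤ t.length := by
              have : ¬ t.length < 3 := fun hlt =>
                h2 (by simp only [h4, Bool.true_and, decide_eq_true_eq]; exact hlt)
              omega
            rw [List.filter_cons_of_pos (p := fun x => PySem.Str.len x == b) h4,
              List.take_append_of_le_length ht3, List.take_append_of_le_length ht3]
          · rw [List.filter_cons_of_neg (p := fun x => PySem.Str.len x == b) h4]
        · rw [if_neg (by omega : ¬ max (PySem.Str.len s) (pvMax l) ≤ b), if_neg h3,
            max_eq_right (by omega : PySem.Str.len s ≤ pvMax l),
            List.filter_cons_of_neg (p := fun x => PySem.Str.len x == pvMax l)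
              (fun hx => absurd (eq_of_beq hx) (by omega))]

theorem recommend_meal_eq (last_meal : String) (specials : List String) (surplus : List String) :
    recommend_meal last_meal specials surplus = recommend_meal_alt last_meal specials surplus := by
  have hM0 : 0 ≤ pvMax specials := pvMax_nonneg specials
  simp only [recommend_meal, recommend_meal_alt]
  have hhigh : (specials.foldl (fun h special =>
      if pvGetProximity special surplus > h then pvGetProximity special surplus else h) 0)
      = max 0 (pvMax specials) := pvFoldl_max specials 0 le_rfl
  rw [hhigh, max_eq_right hM0]
  -- the grouping loop is a filter
  have hgroup : specials.foldl (fun acc special =>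
      if pvGetProximity special surplus == pvMax specials then acc ++ [special] else acc) []
      = specials.filter (fun s => PySem.Str.len s == pvMax specials) := by
    have h := PySem.List.foldl_append_if
      (fun s => PySem.Str.len s == pvMax specials) id specials []
    simp only [id_eq, List.map_id, List.nil_append] at h
    exact h
  rw [hgroup]
  set F := specials.filter (fun s => PySem.Str.len s == pvMax specials) with hF
  have hFall : ∀ x ∈ F, PySem.Str.len x = pvMax specials := by
    intro x hx
    rw [hF] at hx
    exact eq_of_beq
      (List.of_mem_filter (p := fun s => PySem.Str.len s == pvMax specials) hx)
  -- the threshold loop is a filter as well (the int proximity exceeds .75 iff it is ≥ 1)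
  have hfoldF : F.foldl (fun acc meal =>
      if 1 ≤ pvGetProximityS meal last_meal then acc ++ [meal] else acc) []
      = F.filter (fun m => decide (1 ≤ PySem.Str.len m)) := by
    have h := PySem.List.foldl_append_if (fun m => decide (1 ≤ PySem.Str.len m)) id F []
    simp only [id_eq, List.map_id, List.nil_append] at h
    have hfg : (fun (acc : List String) (meal : String) =>
        if 1 ≤ pvGetProximityS meal last_meal then acc ++ [meal] else acc)
        = (fun acc meal =>
          if decide (1 ≤ PySem.Str.len meal) = true then acc ++ [meal] else acc) := by
      funext acc meal; simp [pvGetProximityS]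
    rw [hfg]; exact h
  rw [hfoldF, pvBLoop_spec specials 0 [] le_rfl (by simp)]
  by_cases hpos : 0 < pvMax specials
  · have hfeq : F.filter (fun m => decide (1 ≤ PySem.Str.len m)) = F :=
      List.filter_eq_self.mpr (fun x hx => decide_eq_true (by have := hFall x hx; omega))
    have hsorted : PySem.List.sorted F (fun meal => pvGetProximityS meal last_meal) true = F := by
      apply PySem.List.sorted_rev_eq_self_of_pairwise
      apply List.pairwise_of_forall_mem_list
      intro a ha c hc
      simp only [pvGetProximityS]
      rw [hFall a ha, hFall c hc]
    rw [hfeq, hsorted, PySem.List.slice_to _ (by norm_num)]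
    simp [max_eq_right hM0, hpos]
    rw [if_neg (by omega : ¬ pvMax specials ≤ 0)]
    conv_lhs => rw [hF]
    simp only [PySem.Str.len_eq, String.length_toList]
  · have hMz : pvMax specials = 0 := by omega
    have hfnil : F.filter (fun m => decide (1 ≤ PySem.Str.len m)) = [] :=
      List.filter_eq_nil_iff.mpr (fun x hx => by
        have := hFall x hx
        simp only [decide_eq_true_eq]; omega)
    rw [hfnil, (PySem.List.sorted_eq_nil_iff _ _ _).mpr rfl,
      PySem.List.slice_to _ (by norm_num)]
    simp [hMz]

-- ===== VERDICT (by name: the statement is the Claim_ definition above) =====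
theorem recommend_meal_spec : Claim_equal_recommend_meal := by
  intro last_meal specials surplus _
  exact recommend_meal_eq last_meal specials surplus
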